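-- pv_equiv track=rewrite | github.com/ypchan/autotax2 | autotax2/intron.py | find_query_insertions
-- ===== SOURCE A (Python) =====
-- from typing import Dict, List, Tuple
--
-- def find_query_insertions(qrow: str, trow: str, min_intron_len: int = 50) -> List[Dict[str, int]]:
--     if len(qrow) != len(trow):
--         raise ValueError("qrow and trow have different lengths")
--     insertions: List[Dict[str, int]] = []
--     qpos = 0
--     i = 0
--     n = len(qrow)
--     while i < n:
--         if qrow[i] != "-":
--             qpos += 1
--         if qrow[i] != "-" and trow[i] == "-":
--             start_q = qpos
--             length = 1
--             j = i + 1
--             qpos_j = qpos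
--             while j < n:
--                 if qrow[j] != "-":
--                     qpos_j += 1
--                 if qrow[j] != "-" and trow[j] == "-":
--                     length += 1
--                     j += 1
--                     continue
--                 break
--             end_q = qpos_j
--             if length >= min_intron_len:
--                 insertions.append({
--                     "query_start": start_q,
--                     "query_end": end_q,
--                     "length": length,
--                     "alignment_start": i + 1,
--                     "alignment_end": j,
--                 })
--             qpos = qpos_j
--             i = j
--             continue
--         i += 1
--     return insertions
-- ===== SOURCE B (Python) =====
-- from typing import Dict, List
--
--
-- def find_query_insertions(qrow: str, trow: str, min_intron_len: int = 50) -> List[Dict[str, int]]: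
--     if len(qrow) != len(trow):
--         raise ValueError("qrow and trow have different lengths")
--     # One flat pass: collect every maximal insertion run as
--     # (start, end, cum_query_at_start, cum_query_at_end), then build the rows.
--     runs = []
--     c = 0            # number of non-gap query characters seen so far
--     start = None
--     end = cstart = cend = 0
--     for i, (q, t) in enumerate(zip(qrow, trow)):
--         if q != "-":
--             c += 1
--         if q != "-" and t == "-":
--             if start is None:
--                 start, cstart = i, c
--             end, cend = i, c
--         elif start is not None:
--             runs.append((start, end, cstart, cend))
--             start = None
--     if start is not None:
--         runs.append((start, end, cstart, cend))
--     return [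
--         {
--             "query_start": cs,
--             "query_end": ce,
--             "length": e - s + 1,
--             "alignment_start": s + 1,
--             "alignment_end": e + 1,
--         }
--         for s, e, cs, ce in runs
--         if e - s + 1 >= min_intron_len
--     ]
-- ===== Notes on version B (the rewrite author's own statement) =====
-- stated objective: simpler
-- what changed: Replaces A's nested while-loops with index jumps and a drifting qpos counter by one flat pass that collects every maximal insertion run together with its query-coordinate bounds, followed by a comprehension that filters and formats the rows; this also fixes A's coordinate drift.
-- intended difference: On alignments where some maximal insertion run of reported length ends at (or lies after) a column in which both query and target have a residue right after an insertion column, A double-counts that break column: it returns rows whose query_end (and all later query_start/query_end) are shifted up by one per such break, while B returns the true ungapped query coordinates, which is what the intron coordinates are for. — e.g. on find_query_insertions("AB", "-C", 1): A returns [[("query_start", 1), ("query_end", 2), ("length", 1), ("alignment_start", 1), ("alignment_end", 1)]], B returns [[("query_start", 1), ("query_end", 1), ("length", 1), ("alignment_start", 1), ("alignment_end", 1)]]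
import Mathlib
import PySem

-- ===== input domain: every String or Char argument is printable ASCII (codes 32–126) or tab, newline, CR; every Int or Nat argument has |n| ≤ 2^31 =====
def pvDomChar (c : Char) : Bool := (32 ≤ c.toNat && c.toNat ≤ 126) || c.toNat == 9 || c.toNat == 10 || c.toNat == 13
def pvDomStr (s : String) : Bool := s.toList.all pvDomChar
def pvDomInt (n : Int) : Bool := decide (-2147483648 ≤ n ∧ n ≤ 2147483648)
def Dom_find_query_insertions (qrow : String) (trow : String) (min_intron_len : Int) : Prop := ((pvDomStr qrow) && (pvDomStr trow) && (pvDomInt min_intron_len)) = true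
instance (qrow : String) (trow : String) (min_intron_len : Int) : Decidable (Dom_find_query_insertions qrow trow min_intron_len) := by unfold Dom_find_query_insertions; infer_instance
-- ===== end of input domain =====

-- B replaces A's nested while-loops (with index jumps and a drifting qpos counter) by one flat
-- run-collecting pass plus a comprehension (objective: simpler); B also returns the intended query
-- coordinates on the D_ inputs where A's qpos bookkeeping double-counts a break column.

-- ===== PORT A =====

-- the dict literal both Pythons append (insertion order of the keys)
def pvRowMk (a1 a2 a3 a4 a5 : Int) : List (String × Int) :=
  [("query_start", a1), ("query_end", a2), ("length", a3), ("alignment_start", a4), ("alignment_end", a5)]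

-- A's inner while loop: state (j, qpos_j, length); returns them plus the remaining suffixes at index j
def portA_inner : List Char → List Char → Int → Int → Int → Int × Int × Int × List Char × List Char
  | q :: qs, t :: ts, j, qq, len =>
    let qq' := if q ≠ '-' then qq + 1 else qq
    if q ≠ '-' ∧ t = '-' then portA_inner qs ts (j + 1) qq' (len + 1)
    else (j, qq', len, q :: qs, t :: ts)
  | _, _, j, qq, len => (j, qq, len, [], [])

-- termination helper for portA_go (the inner loop never lengthens the remaining input)
lemma portA_inner_rest_len : ∀ (qs ts : List Char) (j qq len : Int),
    (portA_inner qs ts j qq len).2.2.2.1.length ≤ qs.length := by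
  intro qs
  induction qs with
  | nil => intro ts j qq len; cases ts <;> simp [portA_inner]
  | cons q qs ih =>
    intro ts j qq len
    cases ts with
    | nil => simp [portA_inner]
    | cons t ts =>
      by_cases h : q ≠ '-' ∧ t = '-' <;> simp [portA_inner, h]
      exact Nat.le_succ_of_le (ih ts (j + 1) _ (len + 1))

-- A's outer while loop: state (i, qpos); rows are consed in append order
def portA_go (m : Int) (qs ts : List Char) (i qpos : Int) : List (List (String × Int)) :=
  match qs, ts with
  | q :: qs', t :: ts' =>
    let qpos1 := if q ≠ '-' then qpos + 1 else qpos
    if q ≠ '-' ∧ t = '-' then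
      let r := portA_inner qs' ts' (i + 1) qpos1 1
      let rest := portA_go m r.2.2.2.1 r.2.2.2.2 r.1 r.2.1
      if r.2.2.1 ≥ m then pvRowMk qpos1 r.2.1 r.2.2.1 (i + 1) r.1 :: rest else rest
    else portA_go m qs' ts' (i + 1) qpos1
  | _, _ => []
termination_by qs.length
decreasing_by
  · simp only [List.length_cons]
    exact Nat.lt_succ_of_le (portA_inner_rest_len _ _ _ _ _)
  · simp only [List.length_cons]; omega

-- A raises ValueError on unequal lengths (excluded by Pre_); the port returns [] there
def find_query_insertions (qrow : String) (trow : String) (min_intron_len : Int) : List (List (String × Int)) :=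
  if qrow.toList.length ≠ trow.toList.length then []
  else portA_go min_intron_len qrow.toList trow.toList 0 0

-- ===== PORT B =====

-- Source B's single pass: state (i, c, open run as (start, end, cum_at_start, cum_at_end))
def pvRunsB : List (Char × Char) → Int → Int → Option (Int × Int × Int × Int) → List (Int × Int × Int × Int)
  | [], _, _, none => []
  | [], _, _, some r => [r]
  | (q, t) :: p, i, c, st =>
    let c' := if q ≠ '-' then c + 1 else c
    if q ≠ '-' ∧ t = '-' then
      match st with
      | none => pvRunsB p (i + 1) c' (some (i, i, c', c'))
      | some (s, _, cs, _) => pvRunsB p (i + 1) c' (some (s, i, cs, c'))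
    else
      match st with
      | none => pvRunsB p (i + 1) c' none
      | some r => r :: pvRunsB p (i + 1) c' none

-- Source B raises ValueError on unequal lengths (excluded by Pre_); the port returns [] there
def find_query_insertions_alt (qrow : String) (trow : String) (min_intron_len : Int) : List (List (String × Int)) :=
  if qrow.toList.length ≠ trow.toList.length then []
  else
    (pvRunsB (qrow.toList.zip trow.toList) 0 0 none).filterMap fun r =>
      if r.2.1 - r.1 + 1 ≥ min_intron_len then
        some (pvRowMk r.2.2.1 r.2.2.2 (r.2.1 - r.1 + 1) (r.1 + 1) (r.2.1 + 1))
      else none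

-- ===== PRECONDITION & SPEC =====

-- Pre_ excludes exactly the inputs on which A raises ValueError (rows of different length)
def Pre_find_query_insertions (qrow : String) (trow : String) (_min_intron_len : Int) : Prop :=
  qrow.toList.length = trow.toList.length
instance (qrow : String) (trow : String) (min_intron_len : Int) : Decidable (Pre_find_query_insertions qrow trow min_intron_len) := by unfold Pre_find_query_insertions; infer_instance

def pvWitness_find_query_insertions : String × String × Int := ("ACGT", "AC-T", 1)

-- D_ helpers (closed-form conditions on the input characters only):
-- column k is an insertion column (query residue over a target gap)
def pvInsB (q t : List Char) (k : Nat) : Bool := q.getD k '-' != '-' && t.getD k ' ' == '-'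
-- column j carries residues in both rows and immediately follows an insertion column
def pvBbB (q t : List Char) (j : Nat) : Bool :=
  q.getD j '-' != '-' && t.getD j ' ' != '-' && pvInsB q t (j - 1)
-- length of the insertion run ending at column e (0 when e is no insertion column)
def pvRunLen (q t : List Char) : Nat → Nat
  | 0 => if pvInsB q t 0 then 1 else 0
  | e + 1 => if pvInsB q t (e + 1) then pvRunLen q t e + 1 else 0
-- some maximal insertion run of reported length ends at, or lies after, a residue-residue column
-- that immediately follows an insertion column
def pvBad (q t : List Char) (m : Int) : Bool :=
  (List.range q.length).any fun e =>
    pvInsB q t e && !pvInsB q t (e + 1) && decide ((pvRunLen q t e : Int) ≥ m) &&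
      (List.range (e + 2)).any (pvBbB q t)

-- On alignments where a maximal insertion run of reported length ends at (or lies after) a
-- residue-residue column that immediately follows an insertion column, A double-counts that break
-- column, shifting query_end (and every later run's query coordinates) up by one per such break;
-- B returns the true ungapped query coordinates, which is what intron coordinates are for.
def D_find_query_insertions (qrow : String) (trow : String) (min_intron_len : Int) : Prop :=
  pvBad qrow.toList trow.toList min_intron_len = true
instance (qrow : String) (trow : String) (min_intron_len : Int) : Decidable (D_find_query_insertions qrow trow min_intron_len) := by unfold D_find_query_insertions; infer_instance

def Spec_find_query_insertions (qrow : String) (trow : String) (min_intron_len : Int) (out : List (List (String × Int))) : Prop := ¬ D_find_query_insertions qrow trow min_intron_len → out = find_query_insertions_alt qrow trow min_intron_len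
instance (qrow : String) (trow : String) (min_intron_len : Int) (out : List (List (String × Int))) : Decidable (Spec_find_query_insertions qrow trow min_intron_len out) := by unfold Spec_find_query_insertions; infer_instance

def pvDiffWitness_find_query_insertions : String × String × Int := ("AB", "-C", 1)
def pvDiffWitnessOut_find_query_insertions : (List (List (String × Int))) × (List (List (String × Int))) :=
  ([[("query_start", 1), ("query_end", 2), ("length", 1), ("alignment_start", 1), ("alignment_end", 1)]],
   [[("query_start", 1), ("query_end", 1), ("length", 1), ("alignment_start", 1), ("alignment_end", 1)]])

-- ===== CLAIM (what is proved, stated in full; the proofs are below) =====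
def Claim_unchanged_find_query_insertions : Prop := ∀ (qrow : String) (trow : String) (min_intron_len : Int), Dom_find_query_insertions qrow trow min_intron_len → Pre_find_query_insertions qrow trow min_intron_len → Spec_find_query_insertions qrow trow min_intron_len (find_query_insertions qrow trow min_intron_len)
def Claim_changed_find_query_insertions : Prop := Dom_find_query_insertions (pvDiffWitness_find_query_insertions.1) (pvDiffWitness_find_query_insertions.2.1) (pvDiffWitness_find_query_insertions.2.2) ∧ Pre_find_query_insertions (pvDiffWitness_find_query_insertions.1) (pvDiffWitness_find_query_insertions.2.1) (pvDiffWitness_find_query_insertions.2.2) ∧ D_find_query_insertions (pvDiffWitness_find_query_insertions.1) (pvDiffWitness_find_query_insertions.2.1) (pvDiffWitness_find_query_insertions.2.2) ∧ find_query_insertions (pvDiffWitness_find_query_insertions.1) (pvDiffWitness_find_query_insertions.2.1) (pvDiffWitness_find_query_insertions.2.2) = pvDiffWitnessOut_find_query_insertions.1 ∧ find_query_insertions_alt (pvDiffWitness_find_query_insertions.1) (pvDiffWitness_find_query_insertions.2.1) (pvDiffWitness_find_query_insertions.2.2) = pvDiffWitnessOut_find_query_insertions.2 ∧ pvDiffWitnessOut_find_query_insertions.1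 ≠ pvDiffWitnessOut_find_query_insertions.2
def Claim_exact_find_query_insertions : Prop := ∀ (qrow : String) (trow : String) (min_intron_len : Int), Dom_find_query_insertions qrow trow min_intron_len → Pre_find_query_insertions qrow trow min_intron_len → D_find_query_insertions qrow trow min_intron_len → find_query_insertions qrow trow min_intron_len ≠ find_query_insertions_alt qrow trow min_intron_len

-- ===== LEMMAS AND PROOFS =====

-- proof-side run list: pvRunsB's entries enriched with the bad-break flag of the closing column
def specE : List (Char × Char) → Int → Int → Option (Int × Int × Int × Int) → List (Int × Int × Int × Int × Bool)
  | [], _, _, none => []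
  | [], _, _, some (s, e, cs, ce) => [(s, e, cs, ce, false)]
  | (q, t) :: p, i, c, st =>
    let c' := if q ≠ '-' then c + 1 else c
    if q ≠ '-' ∧ t = '-' then
      match st with
      | none => specE p (i + 1) c' (some (i, i, c', c'))
      | some (s, _, cs, _) => specE p (i + 1) c' (some (s, i, cs, c'))
    else
      match st with
      | none => specE p (i + 1) c' none
      | some (s, e, cs, ce) => (s, e, cs, ce, decide (q ≠ '-')) :: specE p (i + 1) c' none

def pvBBOf : List Char → Bool
  | [] => false
  | x :: _ => decide (x ≠ '-')

def pvIncOf (l : List Char) : Int := if pvBBOf l then 1 else 0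

def pvTailSpec (rq rt : List Char) (j' c'' : Int) : List (Int × Int × Int × Int × Bool) :=
  match rq, rt with
  | _ :: rq', _ :: rt' => specE (rq'.zip rt') (j' + 1) c'' none
  | _, _ => []

-- A's rows over the enriched run list, with the accumulated drift d
def rowsA (m : Int) : List (Int × Int × Int × Int × Bool) → Int → List (List (String × Int))
  | [], _ => []
  | (s, e, cs, ce, bb) :: r, d =>
    (if e - s + 1 ≥ m then
        [pvRowMk (cs + d) (ce + d + (if bb then 1 else 0)) (e - s + 1) (s + 1) (e + 1)]
      else []) ++ rowsA m r (if bb then d + 1 else d)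

-- B's rows over the enriched run list
def rowsB (m : Int) (l : List (Int × Int × Int × Int × Bool)) : List (List (String × Int)) :=
  l.filterMap fun x =>
    if x.2.1 - x.1 + 1 ≥ m then
      some (pvRowMk x.2.2.1 x.2.2.2.1 (x.2.1 - x.1 + 1) (x.1 + 1) (x.2.1 + 1))
    else none

-- "A's rows equal B's rows": every reported entry sees zero drift and no bad break
def goodL (m : Int) : List (Int × Int × Int × Int × Bool) → Int → Prop
  | [], _ => True
  | (s, e, _, _, bb) :: r, d => (e - s + 1 ≥ m → d = 0 ∧ bb = false) ∧ goodL m r (if bb then d + 1 else d)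

-- proof-side formulation of a maximal insertion run (used to state the bridge to pvBad)
def pvMaxRunB (q t : List Char) (s e : Nat) : Bool :=
  decide (s ≤ e) && decide (e < q.length) && (List.range' s (e + 1 - s)).all (pvInsB q t)
    && (decide (s = 0) || !pvInsB q t (s - 1)) && !pvInsB q t (e + 1)

lemma getD_congr {l : List Char} {i : Nat} (h : i < l.length) (a b : Char) :
    l.getD i a = l.getD i b := by
  simp [List.getD, List.getElem?_eq_getElem h]

lemma insB_lt {q t : List Char} {k : Nat} (h : pvInsB q t k = true) : k < q.length := by
  by_contra hc
  simp [pvInsB, List.getD, List.getElem?_eq_none (show q.length ≤ k by omega)] at h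

-- the input-side reading of goodL from position i on, with drift d
def pvP (q t : List Char) (m : Int) (i : Nat) (d : Int) : Prop :=
  ∀ s e : Nat, i ≤ s → pvMaxRunB q t s e = true → (e : Int) - (s : Int) + 1 ≥ m →
    d = 0 ∧ ∀ j : Nat, i ≤ j → j ≤ e + 1 → pvBbB q t j = false


-- small facts about the D_ predicates
lemma maxRunB_iff (q t : List Char) (s e : Nat) : pvMaxRunB q t s e = true ↔
    (s ≤ e ∧ e < q.length ∧ (∀ k, s ≤ k → k ≤ e → pvInsB q t k = true) ∧
      (s = 0 ∨ pvInsB q t (s - 1) = false) ∧ pvInsB q t (e + 1) = false) := by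
  simp only [pvMaxRunB, Bool.and_eq_true, Bool.or_eq_true, Bool.not_eq_true',
    decide_eq_true_eq, List.all_eq_true]
  constructor
  · rintro ⟨⟨⟨⟨h1, h2⟩, h3⟩, h4⟩, h5⟩
    refine ⟨h1, h2, ?_, h4, h5⟩
    intro k hk1 hk2
    exact h3 k (by rw [List.mem_range'_1]; omega)
  · rintro ⟨h1, h2, h3, h4, h5⟩
    refine ⟨⟨⟨⟨h1, h2⟩, ?_⟩, h4⟩, h5⟩
    intro k hk
    rw [List.mem_range'_1] at hk
    exact h3 k hk.1 (by omega)

lemma insB_false_of_ge (q t : List Char) (k : Nat) (h : q.length ≤ k) : pvInsB q t k = false := by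
  simp [pvInsB, List.getD, List.getElem?_eq_none h]

lemma bbB_false_of_ge (q t : List Char) (j : Nat) (h : q.length ≤ j) : pvBbB q t j = false := by
  simp [pvBbB, List.getD, List.getElem?_eq_none h]

lemma insB_chars {q t : List Char} {i : Nat} (h : pvInsB q t i = true) :
    q.getD i ' ' ≠ '-' ∧ t.getD i ' ' = '-' := by
  have hlt := insB_lt h
  simp only [pvInsB, Bool.and_eq_true, bne_iff_ne, beq_iff_eq] at h
  exact ⟨by rw [getD_congr hlt ' ' '-']; exact h.1, h.2⟩

lemma insB_mk {q t : List Char} {i : Nat} (hin : i < q.length)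
    (hq : q.getD i ' ' ≠ '-') (ht : t.getD i ' ' = '-') : pvInsB q t i = true := by
  unfold pvInsB
  rw [getD_congr hin '-' ' ']
  simp only [List.getD] at hq ht
  simp [hq, ht]

lemma maxRun_bounds {q t : List Char} {s e : Nat} (h : pvMaxRunB q t s e = true) :
    s ≤ e ∧ e < q.length := by
  rw [maxRunB_iff] at h; exact ⟨h.1, h.2.1⟩

lemma maxRun_ins {q t : List Char} {s e : Nat} (h : pvMaxRunB q t s e = true) :
    ∀ k, s ≤ k → k ≤ e → pvInsB q t k = true := by
  rw [maxRunB_iff] at h; exact h.2.2.1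

lemma maxRun_left {q t : List Char} {s e : Nat} (h : pvMaxRunB q t s e = true) :
    s = 0 ∨ pvInsB q t (s - 1) = false := by
  rw [maxRunB_iff] at h; exact h.2.2.2.1

lemma maxRun_right {q t : List Char} {s e : Nat} (h : pvMaxRunB q t s e = true) :
    pvInsB q t (e + 1) = false := by
  rw [maxRunB_iff] at h; exact h.2.2.2.2

lemma maxRun_uniq {q t : List Char} {s e e' : Nat} (h : pvMaxRunB q t s e = true)
    (h' : pvMaxRunB q t s e' = true) : e = e' := by
  by_contra hne
  have hb1 := maxRun_bounds h
  have hb2 := maxRun_bounds h'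
  rcases Nat.lt_or_ge e e' with hlt | hge
  · have h2 := maxRun_ins h' (e + 1) (by omega) (by have := maxRun_bounds h'; omega)
    rw [maxRun_right h] at h2; simp at h2
  · have hlt : e' < e := by omega
    have h2 := maxRun_ins h (e' + 1) (by omega) (by omega)
    rw [maxRun_right h'] at h2; simp at h2

lemma bb_of_ins {q t : List Char} {j : Nat} (h : pvInsB q t j = true) : pvBbB q t j = false := by
  have ht := (insB_chars h).2
  simp only [List.getD] at ht
  simp [pvBbB, ht]

lemma bb_no_prev {q t : List Char} {j : Nat} (h : j = 0 ∨ pvInsB q t (j - 1) = false) :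
    pvBbB q t j = false := by
  rcases h with h | h
  · subst h
    by_cases h0 : pvInsB q t 0 = true
    · have ht := (insB_chars h0).2
      simp only [List.getD] at ht
      simp [pvBbB, ht]
    · have h0' : pvInsB q t 0 = false := by
        cases hx : pvInsB q t 0
        · rfl
        · exact absurd hx h0
      simp [pvBbB, h0']
  · simp [pvBbB, h]

lemma mkMaxRun {q t : List Char} {s i : Nat} (hsi : s < i) (hin : i ≤ q.length)
    (hrun : ∀ kk, s ≤ kk → kk < i → pvInsB q t kk = true)
    (hb : s = 0 ∨ pvInsB q t (s - 1) = false)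
    (hni : pvInsB q t i = false) : pvMaxRunB q t s (i - 1) = true := by
  rw [maxRunB_iff]
  refine ⟨by omega, by omega, ?_, hb, ?_⟩
  · intro k hk1 hk2
    exact hrun k hk1 (by omega)
  · have h : i - 1 + 1 = i := by omega
    rw [h]; exact hni

-- input-side facts about pvP
lemma pvP_trivial (q t : List Char) (m : Int) {i : Nat} (d : Int) (h : q.length ≤ i) :
    pvP q t m i d := by
  intro s e hs hmr _
  have := maxRun_bounds hmr
  omega

lemma stepP_noins {q t : List Char} {m : Int} {i : Nat} {d : Int}
    (hb : i = 0 ∨ pvInsB q t (i - 1) = false) (hni : pvInsB q t i = false) :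
    pvP q t m i d ↔ pvP q t m (i + 1) d := by
  constructor
  · intro hp s e hs hmr hm
    obtain ⟨hd0, hj⟩ := hp s e (by omega) hmr hm
    exact ⟨hd0, fun j hj1 hj2 => hj j (by omega) hj2⟩
  · intro hp s e hs hmr hm
    have hs' : i + 1 ≤ s := by
      rcases Nat.lt_or_ge i s with h | h
      · omega
      · exfalso
        have hsi : s = i := by omega
        subst hsi
        have h2 := maxRun_ins hmr s le_rfl (maxRun_bounds hmr).1
        rw [hni] at h2; simp at h2
    obtain ⟨hd0, hj⟩ := hp s e hs' hmr hm
    refine ⟨hd0, fun j hj1 hj2 => ?_⟩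
    rcases Nat.lt_or_ge j (i + 1) with h | h
    · have hji : j = i := by omega
      subst hji; exact bb_no_prev hb
    · exact hj j h hj2

lemma closeStep {q t : List Char} {m : Int} {i s : Nat} {d : Int} (hd : 0 ≤ d)
    (hsi : s < i) (hin : i ≤ q.length)
    (hrun : ∀ kk, s ≤ kk → kk < i → pvInsB q t kk = true)
    (hb : s = 0 ∨ pvInsB q t (s - 1) = false)
    (hni : pvInsB q t i = false) :
    pvP q t m s d ↔
      ((((i : Int) - 1) - (s : Int) + 1 ≥ m → d = 0 ∧ pvBbB q t i = false) ∧
        pvP q t m (i + 1) (if pvBbB q t i then d + 1 else d)) := by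
  have hrunM : pvMaxRunB q t s (i - 1) = true := mkMaxRun hsi hin hrun hb hni
  have hcast : ((i - 1 : Nat) : Int) = (i : Int) - 1 := by omega
  have hlow : ∀ j, s ≤ j → j < i → pvBbB q t j = false := by
    intro j hj1 hj2
    rcases Nat.eq_or_lt_of_le hj1 with h | h
    · exact h ▸ bb_no_prev hb
    · exact bb_of_ins (hrun j (by omega) hj2)
  constructor
  · intro hp
    constructor
    · intro hm
      obtain ⟨hd0, hj⟩ := hp s (i - 1) le_rfl hrunM (by rw [hcast]; omega)
      exact ⟨hd0, hj i (by omega) (by omega)⟩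
    · intro s' e' hs' hmr hm
      obtain ⟨hd0, hj⟩ := hp s' e' (by omega) hmr hm
      have hbbif : pvBbB q t i = false := by
        have := maxRun_bounds hmr
        exact hj i (by omega) (by omega)
      rw [hbbif]
      exact ⟨hd0, fun j hj1 hj2 => hj j (by omega) hj2⟩
  · rintro ⟨hcur, hrest⟩ s' e' hs' hmr hm
    rcases Nat.lt_or_ge s' i with h | h
    · -- s' < i : the run starting at s' is the current one
      have hseq : s' = s := by
        by_contra hne
        have hs'1 : 1 ≤ s' := by omega
        have hprev : pvInsB q t (s' - 1) = true := hrun (s' - 1) (by omega) (by omega)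
        rcases maxRun_left hmr with h0 | h0
        · omega
        · rw [hprev] at h0; simp at h0
      subst hseq
      have heq : e' = i - 1 := maxRun_uniq hmr hrunM
      subst heq
      rw [hcast] at hm
      obtain ⟨hd0, hbb⟩ := hcur (by omega)
      refine ⟨hd0, fun j hj1 hj2 => ?_⟩
      rcases Nat.lt_or_ge j i with hj3 | hj3
      · exact hlow j hj1 hj3
      · have hji : j = i := by omega
        subst hji; exact hbb
    · -- s' ≥ i : a later run; it cannot start at i (column i is not an insertion)
      have hs'' : i + 1 ≤ s' := by
        rcases Nat.eq_or_lt_of_le h with h0 | h0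
        · exfalso
          have h2 := maxRun_ins hmr s' le_rfl (maxRun_bounds hmr).1
          rw [← h0, hni] at h2; simp at h2
        · omega
      obtain ⟨hd0, hj⟩ := hrest s' e' hs'' hmr hm
      have hbbif : pvBbB q t i = false := by
        by_contra hc
        simp only [Bool.not_eq_false] at hc
        rw [hc] at hd0; simp at hd0; omega
      rw [hbbif] at hd0
      simp only [Bool.false_eq_true, if_false] at hd0
      refine ⟨hd0, fun j hj1 hj2 => ?_⟩
      rcases Nat.lt_or_ge j i with hj3 | hj3
      · exact hlow j hj1 hj3
      · rcases Nat.eq_or_lt_of_le hj3 with h4 | h4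
        · exact h4 ▸ hbbif
        · exact hj j (by omega) hj2

-- one-step unfoldings of specE (kept as lemmas so the main inductions can rewrite cleanly)
lemma specE_nil_some (i c s e cs ce : Int) :
    specE [] i c (some (s, e, cs, ce)) = [(s, e, cs, ce, false)] := rfl

lemma specE_cons_ins_none {q t : Char} (p : List (Char × Char)) (i c : Int)
    (h : q ≠ '-' ∧ t = '-') :
    specE ((q, t) :: p) i c none = specE p (i + 1) (c + 1) (some (i, i, c + 1, c + 1)) := by
  simp [specE, h]

lemma specE_cons_ins_some {q t : Char} (p : List (Char × Char)) (i c s e cs ce : Int)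
    (h : q ≠ '-' ∧ t = '-') :
    specE ((q, t) :: p) i c (some (s, e, cs, ce)) =
      specE p (i + 1) (c + 1) (some (s, i, cs, c + 1)) := by
  simp [specE, h]

lemma specE_cons_noins_none {q t : Char} (p : List (Char × Char)) (i c : Int)
    (h : ¬(q ≠ '-' ∧ t = '-')) :
    specE ((q, t) :: p) i c none = specE p (i + 1) (if q ≠ '-' then c + 1 else c) none := by
  simp [specE, h]

lemma specE_cons_noins_some {q t : Char} (p : List (Char × Char)) (i c s e cs ce : Int)
    (h : ¬(q ≠ '-' ∧ t = '-')) :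
    specE ((q, t) :: p) i c (some (s, e, cs, ce)) =
      (s, e, cs, ce, decide (q ≠ '-')) :: specE p (i + 1) (if q ≠ '-' then c + 1 else c) none := by
  simp [specE, h]

lemma innerA : ∀ (qs ts : List Char), qs.length = ts.length →
    ∀ (j c d s cs : Int),
    ∃ j' qq' rq rt,
      portA_inner qs ts j (c + d) (j - s) = (j', qq', j' - s, rq, rt) ∧
      rq.length = rt.length ∧ rq.length ≤ qs.length ∧
      specE (qs.zip ts) j c (some (s, j - 1, cs, c)) =
        (s, j' - 1, cs, qq' - d - pvIncOf rq, pvBBOf rq) :: pvTailSpec rq rt j' (qq' - d) ∧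
      (∀ x rq' y rt', rq = x :: rq' → rt = y :: rt' → ¬(x ≠ '-' ∧ y = '-')) := by
  intro qs
  induction qs with
  | nil =>
    intro ts hlen j c d s cs
    have hts : ts = [] := by simpa using (List.length_eq_zero_iff.mp hlen.symm)
    subst hts
    refine ⟨j, c + d, [], [], ?_, rfl, le_rfl, ?_, by intro x rq' y rt' hx _; cases hx⟩
    · simp [portA_inner]
    · rw [List.zip_nil_left, specE_nil_some]
      simp [pvTailSpec, pvBBOf, pvIncOf]
  | cons x qs ih =>
    intro ts hlen j c d s cs
    cases ts with
    | nil => simp at hlen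
    | cons y ts =>
      have hlen' : qs.length = ts.length := by simpa using hlen
      by_cases h : x ≠ '-' ∧ y = '-'
      · -- the run extends by one column
        obtain ⟨j', qq', rq, rt, h1, h2, h3, h4, h5⟩ := ih ts hlen' (j + 1) (c + 1) d s cs
        refine ⟨j', qq', rq, rt, ?_, h2, Nat.le_succ_of_le h3, ?_, h5⟩
        · have e0 : portA_inner (x :: qs) (y :: ts) j (c + d) (j - s) =
              portA_inner qs ts (j + 1) ((c + d) + 1) ((j - s) + 1) := by
            simp [portA_inner, h]
          rw [e0, show (c + d) + 1 = (c + 1) + d from by ring,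
            show (j - s) + 1 = (j + 1) - s from by ring]
          exact h1
        · rw [List.zip_cons_cons, specE_cons_ins_some _ _ _ _ _ _ _ h]
          rw [show (j + 1 : Int) - 1 = j from by ring] at h4
          exact h4
      · -- the run breaks at this column
        refine ⟨j, (if x ≠ '-' then (c + d) + 1 else c + d), x :: qs, y :: ts, ?_, by
            simpa using hlen, le_rfl, ?_, ?_⟩
        · simp [portA_inner, h]
        · rw [List.zip_cons_cons, specE_cons_noins_some _ _ _ _ _ _ _ h]
          have hbb : pvBBOf (x :: qs) = decide (x ≠ '-') := rfl
          have htl : pvTailSpec (x :: qs) (y :: ts) j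
              ((if x ≠ '-' then (c + d) + 1 else c + d) - d) =
              specE (qs.zip ts) (j + 1) ((if x ≠ '-' then (c + d) + 1 else c + d) - d) none := rfl
          rw [hbb, htl]
          by_cases hx : x ≠ '-'
          · have e1 : (if x ≠ '-' then (c + d) + 1 else c + d) = c + d + 1 := if_pos hx
            have e2 : pvIncOf (x :: qs) = 1 := by simp [pvIncOf, pvBBOf, hx]
            have e5 : (if x ≠ '-' then c + 1 else c) = c + 1 := if_pos hx
            rw [e1, e2, e5, show c + d + 1 - d - 1 = c from by ring,
              show c + d + 1 - d = c + 1 from by ring]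
          · have e1 : (if x ≠ '-' then (c + d) + 1 else c + d) = c + d := if_neg hx
            have e2 : pvIncOf (x :: qs) = 0 := by simp [pvIncOf, pvBBOf, hx]
            have e5 : (if x ≠ '-' then c + 1 else c) = c := if_neg hx
            rw [e1, e2, e5, show c + d - d - 0 = c from by ring,
              show c + d - d = c from by ring]
        · intro a rq' b rt' ha hb
          cases ha; cases hb; exact h
  

lemma portA_go_nil (m : Int) (ts : List Char) (i qpos : Int) :
    portA_go m [] ts i qpos = [] := by
  rw [portA_go]
  exact fun _ _ _ _ h _ => by cases h

lemma portA_go_cons_noins (m : Int) (x y : Char) (qs ts : List Char) (i qpos : Int)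
    (h : ¬(x ≠ '-' ∧ y = '-')) :
    portA_go m (x :: qs) (y :: ts) i qpos =
      portA_go m qs ts (i + 1) (if x ≠ '-' then qpos + 1 else qpos) := by
  rw [portA_go]
  simp [h]

lemma portA_go_cons_ins (m : Int) (x y : Char) (qs ts : List Char) (i qpos j' qq' len : Int)
    (rq rt : List Char) (h : x ≠ '-' ∧ y = '-')
    (hr : portA_inner qs ts (i + 1) (qpos + 1) 1 = (j', qq', len, rq, rt)) :
    portA_go m (x :: qs) (y :: ts) i qpos =
      if len ≥ m then pvRowMk (qpos + 1) qq' len (i + 1) j' :: portA_go m rq rt j' qq'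
      else portA_go m rq rt j' qq' := by
  rw [portA_go]
  simp [h, hr]

lemma mainA (m : Int) : ∀ (N : Nat) (qs ts : List Char), qs.length ≤ N → qs.length = ts.length →
    ∀ (i c d : Int), portA_go m qs ts i (c + d) = rowsA m (specE (qs.zip ts) i c none) d := by
  intro N
  induction N with
  | zero =>
    intro qs ts hN hlen i c d
    have h1 : qs = [] := List.length_eq_zero_iff.mp (Nat.le_zero.mp hN)
    subst h1
    have h2 : ts = [] := List.length_eq_zero_iff.mp hlen.symm
    subst h2
    simp [portA_go_nil, specE, rowsA]
  | succ N ih =>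
    intro qs ts hN hlen i c d
    cases qs with
    | nil =>
      have h2 : ts = [] := List.length_eq_zero_iff.mp hlen.symm
      subst h2
      simp [portA_go_nil, specE, rowsA]
    | cons x qs' =>
      cases ts with
      | nil => simp at hlen
      | cons y ts' =>
        have hlen' : qs'.length = ts'.length := by simpa using hlen
        have hN' : qs'.length ≤ N := by simp at hN; omega
        by_cases h : x ≠ '-' ∧ y = '-'
        · -- a run starts at column i
          obtain ⟨j', qq', rq, rt, h1, h2, h3, h4, h5⟩ :=
            innerA qs' ts' hlen' (i + 1) (c + 1) d i (c + 1)
          rw [show ((i : Int) + 1) - i = 1 from by ring] at h1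
          have hr : portA_inner qs' ts' (i + 1) ((c + d) + 1) 1 = (j', qq', j' - i, rq, rt) := by
            rw [show (c + d) + 1 = (c + 1) + d from by ring]
            exact h1
          rw [portA_go_cons_ins m x y qs' ts' i (c + d) j' qq' (j' - i) rq rt h hr]
          rw [List.zip_cons_cons, specE_cons_ins_none _ _ _ h]
          rw [show ((i : Int) + 1) - 1 = i from by ring] at h4
          rw [h4]
          -- the two tails agree
          have hrest : portA_go m rq rt j' qq' =
              rowsA m (pvTailSpec rq rt j' (qq' - d)) (d + pvIncOf rq) := by
            cases rq with
            | nil =>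
              have h6 : rt = [] := List.length_eq_zero_iff.mp h2.symm
              subst h6
              simp [portA_go_nil, pvTailSpec, rowsA]
            | cons a rq₂ =>
              cases rt with
              | nil => simp at h2
              | cons b rt₂ =>
                have hno : ¬(a ≠ '-' ∧ b = '-') := h5 a rq₂ b rt₂ rfl rfl
                rw [portA_go_cons_noins _ _ _ _ _ _ _ hno]
                have hq : (if a ≠ '-' then qq' + 1 else qq') = (qq' - d) + (d + pvIncOf (a :: rq₂)) := by
                  by_cases ha : a ≠ '-' <;> simp [ha, pvIncOf, pvBBOf] <;> ring
                rw [hq]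
                have hlen2 : rq₂.length ≤ N := by
                  simp at h3
                  omega
                exact ih rq₂ rt₂ hlen2 (by simpa using h2) (j' + 1) (qq' - d) (d + pvIncOf (a :: rq₂))
          -- assemble both sides of the reported-row split
          have hdrift : (if pvBBOf rq then d + 1 else d) = d + pvIncOf rq := by
            by_cases hbb : pvBBOf rq <;> simp [hbb, pvIncOf]
          have hrowlen : (j' - 1) - i + 1 = j' - i := by ring
          have hrowend : (j' - 1) + 1 = j' := by ring
          have hrowq : qq' - d - pvIncOf rq + d + (if pvBBOf rq then 1 else 0) = qq' := by
            by_cases hbb : pvBBOf rq <;> simp [hbb, pvIncOf] <;> ring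
          simp only [rowsA, hdrift, hrowlen, hrowend, hrowq, ← hrest]
          rw [show (c + 1) + d = (c + d) + 1 from by ring]
          by_cases hrep : j' - i ≥ m <;> simp [hrep]
        · -- column i is not an insertion column
          rw [portA_go_cons_noins _ _ _ _ _ _ _ h]
          rw [List.zip_cons_cons, specE_cons_noins_none _ _ _ h]
          have e : (if x ≠ '-' then (c + d) + 1 else (c + d)) = (if x ≠ '-' then c + 1 else c) + d := by
            by_cases hx : x ≠ '-' <;> simp [hx] <;> ring
          rw [e]
          exact ih qs' ts' hN' hlen' (i + 1) _ d

lemma runsB_spec : ∀ (p : List (Char × Char)) (i c : Int) (st : Option (Int × Int × Int × Int)),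
    pvRunsB p i c st = (specE p i c st).map fun x => (x.1, x.2.1, x.2.2.1, x.2.2.2.1) := by
  intro p
  induction p with
  | nil =>
    intro i c st
    rcases st with _ | ⟨s, e, cs, ce⟩ <;> simp [pvRunsB, specE]
  | cons a p ih =>
    intro i c st
    obtain ⟨q, t⟩ := a
    by_cases h : q ≠ '-' ∧ t = '-' <;>
      rcases st with _ | ⟨s, e, cs, ce⟩ <;> simp [pvRunsB, specE, h, ih]

lemma rowsAB (m : Int) : ∀ (l : List (Int × Int × Int × Int × Bool)) (d : Int), 0 ≤ d →
    (rowsA m l d = rowsB m l ↔ goodL m l d) := by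
  intro l
  induction l with
  | nil => intro d hd; simp [rowsA, rowsB, goodL]
  | cons x r ih =>
    obtain ⟨s, e, cs, ce, bb⟩ := x
    intro d hd
    have hd' : 0 ≤ (if bb then d + 1 else d) := by cases bb <;> simp <;> omega
    have hgl : goodL m ((s, e, cs, ce, bb) :: r) d ↔
        ((e - s + 1 ≥ m → d = 0 ∧ bb = false) ∧ goodL m r (if bb then d + 1 else d)) :=
      Iff.rfl
    rw [hgl]
    by_cases hrep : e - s + 1 ≥ m
    · have hA : rowsA m ((s, e, cs, ce, bb) :: r) d =
          pvRowMk (cs + d) (ce + d + (if bb then 1 else 0)) (e - s + 1) (s + 1) (e + 1) ::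
            rowsA m r (if bb then d + 1 else d) := by
        simp [rowsA, hrep]
      have hB : rowsB m ((s, e, cs, ce, bb) :: r) =
          pvRowMk cs ce (e - s + 1) (s + 1) (e + 1) :: rowsB m r := by
        simp [rowsB, hrep]
      rw [hA, hB, List.cons_eq_cons]
      constructor
      · rintro ⟨h1, h2⟩
        simp only [pvRowMk, List.cons_eq_cons, Prod.mk.injEq] at h1
        obtain ⟨⟨-, e1⟩, ⟨-, e2⟩, -⟩ := h1
        cases bb with
        | true => exfalso; simp at e2; omega
        | false =>
          have hd0 : d = 0 := by omega
          subst hd0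
          exact ⟨fun _ => ⟨rfl, rfl⟩, (ih _ hd').1 h2⟩
      · rintro ⟨h1, h2⟩
        obtain ⟨hd0, hbb⟩ := h1 hrep
        subst hd0 hbb
        simp only [Bool.false_eq_true, if_false, add_zero] at h2 ⊢
        exact ⟨by simp, (ih 0 le_rfl).2 h2⟩
    · have hA : rowsA m ((s, e, cs, ce, bb) :: r) d = rowsA m r (if bb then d + 1 else d) := by
        simp [rowsA, hrep]
      have hB : rowsB m ((s, e, cs, ce, bb) :: r) = rowsB m r := by
        simp [rowsB, hrep]
      rw [hA, hB, ih _ hd']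
      exact ⟨fun h => ⟨fun hc => absurd hc hrep, h⟩, fun h => h.2⟩

lemma zip_drop_step (q t : List Char) (i : Nat) (hlen : q.length = t.length)
    (hi : i < q.length) :
    (q.zip t).drop i = (q.getD i ' ', t.getD i ' ') :: (q.zip t).drop (i + 1) := by
  have hz : i < (q.zip t).length := by
    rw [List.length_zip]; omega
  rw [List.drop_eq_getElem_cons hz]
  congr 1
  rw [List.getElem_zip]
  rw [List.getD_eq_getElem q ' ' (by omega), List.getD_eq_getElem t ' ' (by omega)]

lemma flag_eq {q t : List Char} {i : Nat} (hin : i < q.length) (_h1 : 1 ≤ i)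
    (hprev : pvInsB q t (i - 1) = true) (hni : pvInsB q t i = false) :
    decide (q.getD i ' ' ≠ '-') = pvBbB q t i := by
  have hg : q.getD i '-' = q.getD i ' ' := getD_congr hin '-' ' '
  by_cases hq : q.getD i ' ' = '-'
  · simp only [List.getD] at hg hq ⊢
    have hq2 : q[i]?.getD '-' = '-' := by rw [hg]; exact hq
    simp [pvBbB, List.getD, hq, hq2]
  · have ht : t.getD i ' ' ≠ '-' := fun htc => by
      rw [insB_mk hin hq htc] at hni
      cases hni
    simp only [List.getD] at hg hq ht ⊢
    simp [pvBbB, List.getD, hg, hq, ht, hprev]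

lemma gcgo (q t : List Char) (m : Int) (hlen : q.length = t.length) :
    ∀ (k : Nat),
      (∀ (i : Nat) (c d : Int), q.length - i ≤ k → 0 ≤ d →
        (i = 0 ∨ pvInsB q t (i - 1) = false) →
        (goodL m (specE ((q.zip t).drop i) (i : Int) c none) d ↔ pvP q t m i d)) ∧
      (∀ (i s : Nat) (c cs d e : Int), q.length - i ≤ k → 0 ≤ d →
        s < i → i ≤ q.length → e = (i : Int) - 1 →
        (∀ kk : Nat, s ≤ kk → kk < i → pvInsB q t kk = true) →
        (s = 0 ∨ pvInsB q t (s - 1) = false) →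
        (goodL m (specE ((q.zip t).drop i) (i : Int) c (some ((s : Int), e, cs, c))) d ↔
          pvP q t m s d)) := by
  have hgoEnd : ∀ (i s : Nat) (c cs d e : Int), q.length ≤ i → 0 ≤ d →
      s < i → i ≤ q.length → e = (i : Int) - 1 →
      (∀ kk : Nat, s ≤ kk → kk < i → pvInsB q t kk = true) →
      (s = 0 ∨ pvInsB q t (s - 1) = false) →
      (goodL m (specE ((q.zip t).drop i) (i : Int) c (some ((s : Int), e, cs, c))) d ↔
        pvP q t m s d) := by
    intro i s c cs d e hk hd hsi hin he hrun hb
    have hdrop : (q.zip t).drop i = [] := by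
      apply List.drop_eq_nil_of_le
      rw [List.length_zip]; omega
    rw [hdrop, specE_nil_some, he]
    have hni : pvInsB q t i = false := insB_false_of_ge q t i (by omega)
    have hbbi : pvBbB q t i = false := bbB_false_of_ge q t i (by omega)
    have hcs := closeStep (m := m) hd hsi hin hrun hb hni
    rw [hbbi] at hcs
    simp only [Bool.false_eq_true, if_false] at hcs
    rw [hcs]
    have hgl : goodL m [((s : Int), (i : Int) - 1, cs, c, false)] d ↔
        (((i : Int) - 1 - (s : Int) + 1 ≥ m) → d = 0 ∧ (false = false)) ∧ True := Iff.rfl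
    rw [hgl]
    have hptriv : pvP q t m (i + 1) d := pvP_trivial q t m d (by omega)
    constructor
    · rintro ⟨h1, -⟩
      refine ⟨fun hm => ⟨(h1 hm).1, ?_⟩, hptriv⟩
      simp
    · rintro ⟨h1, -⟩
      refine ⟨fun hm => ⟨(h1 hm).1, ?_⟩, trivial⟩
      simp
  have hgcEnd : ∀ (i : Nat) (c d : Int), q.length ≤ i → 0 ≤ d →
      (goodL m (specE ((q.zip t).drop i) (i : Int) c none) d ↔ pvP q t m i d) := by
    intro i c d hk hd
    have hdrop : (q.zip t).drop i = [] := by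
      apply List.drop_eq_nil_of_le
      rw [List.length_zip]; omega
    rw [hdrop]
    have hgl : goodL m (specE ([] : List (Char × Char)) (i : Int) c none) d ↔ True := Iff.rfl
    rw [hgl]
    exact ⟨fun _ => pvP_trivial q t m d hk, fun _ => trivial⟩
  intro k
  induction k with
  | zero =>
    constructor
    · intro i c d hk hd _
      exact hgcEnd i c d (by omega) hd
    · intro i s c cs d e hk hd hsi hin he hrun hb
      exact hgoEnd i s c cs d e (by omega) hd hsi hin he hrun hb
  | succ k ihk =>
    obtain ⟨ihgc, ihgo⟩ := ihk
    constructor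
    · intro i c d hk hd hb
      rcases Nat.lt_or_ge i q.length with hin | hin
      · have hstep := zip_drop_step q t i hlen hin
        rw [hstep]
        have hcast2 : ((i : Int) + 1) = ((i + 1 : Nat) : Int) := by push_cast; ring
        by_cases hins : pvInsB q t i = true
        · obtain ⟨hqc, htc⟩ := insB_chars hins
          rw [specE_cons_ins_none _ _ _ ⟨hqc, htc⟩, hcast2]
          exact ihgo (i + 1) i (c + 1) (c + 1) d (i : Int) (by omega) hd (by omega)
            (by omega) (by push_cast; ring)
            (fun kk hk1 hk2 => by
              have hkk : kk = i := by omega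
              rw [hkk]; exact hins) hb
        · have hins' : pvInsB q t i = false := by
            cases hx : pvInsB q t i
            · rfl
            · exact absurd hx hins
          have hnc : ¬(q.getD i ' ' ≠ '-' ∧ t.getD i ' ' = '-') := by
            intro hc
            rw [insB_mk hin hc.1 hc.2] at hins'
            cases hins'
          rw [specE_cons_noins_none _ _ _ hnc, hcast2]
          rw [ihgc (i + 1) _ d (by omega) hd (Or.inr (by simpa using hins'))]
          exact (stepP_noins hb hins').symm
      · exact hgcEnd i c d hin hd
    · intro i s c cs d e hk hd hsi hin he hrun hb
      rcases Nat.lt_or_ge i q.length with hin2 | hin2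
      · have hstep := zip_drop_step q t i hlen hin2
        rw [hstep]
        have hcast2 : ((i : Int) + 1) = ((i + 1 : Nat) : Int) := by push_cast; ring
        by_cases hins : pvInsB q t i = true
        · obtain ⟨hqc, htc⟩ := insB_chars hins
          rw [specE_cons_ins_some _ _ _ _ _ _ _ ⟨hqc, htc⟩, hcast2]
          exact ihgo (i + 1) s (c + 1) cs d (i : Int) (by omega) hd (by omega)
            (by omega) (by push_cast; ring)
            (fun kk hk1 hk2 => by
              rcases Nat.lt_or_ge kk i with h2 | h2
              · exact hrun kk hk1 h2
              · have hkk : kk = i := by omega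
                rw [hkk]; exact hins) hb
        · have hins' : pvInsB q t i = false := by
            cases hx : pvInsB q t i
            · rfl
            · exact absurd hx hins
          have hnc : ¬(q.getD i ' ' ≠ '-' ∧ t.getD i ' ' = '-') := by
            intro hc
            rw [insB_mk hin2 hc.1 hc.2] at hins'
            cases hins'
          rw [specE_cons_noins_some _ _ _ _ _ _ _ hnc, hcast2, he]
          have h1i : 1 ≤ i := by omega
          have hprev : pvInsB q t (i - 1) = true := hrun (i - 1) (by omega) (by omega)
          rw [flag_eq hin2 h1i hprev hins']
          have hd' : 0 ≤ (if pvBbB q t i then d + 1 else d) := by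
            by_cases hbb : pvBbB q t i <;> simp [hbb] <;> omega
          have hgl : goodL m (((s : Int), (i : Int) - 1, cs, c, pvBbB q t i) ::
              specE ((q.zip t).drop (i + 1)) ((i + 1 : Nat) : Int)
                (if q.getD i ' ' ≠ '-' then c + 1 else c) none) d ↔
              ((((i : Int) - 1 - (s : Int) + 1 ≥ m) → d = 0 ∧ pvBbB q t i = false) ∧
                goodL m (specE ((q.zip t).drop (i + 1)) ((i + 1 : Nat) : Int)
                  (if q.getD i ' ' ≠ '-' then c + 1 else c) none)
                  (if pvBbB q t i then d + 1 else d)) := Iff.rfl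
          rw [hgl]
          rw [ihgc (i + 1) _ _ (by omega) hd' (Or.inr (by simpa using hins'))]
          exact (closeStep (m := m) hd hsi (by omega) hrun hb hins').symm
      · exact hgoEnd i s c cs d e hin2 hd hsi hin he hrun hb

lemma runLen_le (q t : List Char) : ∀ e, pvRunLen q t e ≤ e + 1 := by
  intro e
  induction e with
  | zero => by_cases h : pvInsB q t 0 = true <;> simp [pvRunLen, h]
  | succ e ih =>
    by_cases h : pvInsB q t (e + 1) = true <;> simp [pvRunLen, h]
    omega

lemma runLen_pos {q t : List Char} {e : Nat} (h : pvInsB q t e = true) :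
    1 ≤ pvRunLen q t e := by
  cases e <;> simp [pvRunLen, h]

lemma runLen_zero {q t : List Char} {e : Nat} (h : pvInsB q t e = false) :
    pvRunLen q t e = 0 := by
  cases e <;> simp [pvRunLen, h]

lemma runLen_window (q t : List Char) : ∀ e k, e + 1 - pvRunLen q t e ≤ k → k ≤ e →
    pvInsB q t k = true := by
  intro e
  induction e with
  | zero =>
    intro k h1 h2
    have hk : k = 0 := by omega
    subst hk
    by_cases h : pvInsB q t 0 = true
    · exact h
    · have h0 : pvInsB q t 0 = false := by
        cases hx : pvInsB q t 0
        · rfl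
        · exact absurd hx h
      rw [runLen_zero h0] at h1
      omega
  | succ e ih =>
    intro k h1 h2
    by_cases h : pvInsB q t (e + 1) = true
    · have hL : pvRunLen q t (e + 1) = pvRunLen q t e + 1 := by simp [pvRunLen, h]
      rcases Nat.lt_or_ge k (e + 1) with hk | hk
      · exact ih k (by omega) (by omega)
      · have hke : k = e + 1 := by omega
        subst hke
        exact h
    · have h0 : pvInsB q t (e + 1) = false := by
        cases hx : pvInsB q t (e + 1)
        · rfl
        · exact absurd hx h
      rw [runLen_zero h0] at h1
      omega

lemma runLen_boundary (q t : List Char) : ∀ e,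
    e + 1 - pvRunLen q t e = 0 ∨ pvInsB q t (e + 1 - pvRunLen q t e - 1) = false := by
  intro e
  induction e with
  | zero =>
    by_cases h : pvInsB q t 0 = true
    · simp [pvRunLen, h]
    · have h0 : pvInsB q t 0 = false := by
        cases hx : pvInsB q t 0
        · rfl
        · exact absurd hx h
      simp [pvRunLen, h0]
  | succ e ih =>
    by_cases h : pvInsB q t (e + 1) = true
    · have hL : pvRunLen q t (e + 1) = pvRunLen q t e + 1 := by simp [pvRunLen, h]
      have hle := runLen_le q t e
      rcases ih with h2 | h2
      · left; omega
      · right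
        rw [hL]
        have : e + 1 + 1 - (pvRunLen q t e + 1) - 1 = e + 1 - pvRunLen q t e - 1 := by omega
        rw [this]
        exact h2
    · have h0 : pvInsB q t (e + 1) = false := by
        cases hx : pvInsB q t (e + 1)
        · rfl
        · exact absurd hx h
      right
      rw [runLen_zero h0]
      simpa using h0

lemma maxRun_start_uniq {q t : List Char} {s s' e : Nat} (h : pvMaxRunB q t s e = true)
    (h' : pvMaxRunB q t s' e = true) : s = s' := by
  by_contra hne
  have hb1 := maxRun_bounds h
  have hb2 := maxRun_bounds h'
  rcases Nat.lt_or_ge s s' with hlt | hge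
  · have h2 := maxRun_ins h (s' - 1) (by omega) (by omega)
    rcases maxRun_left h' with h0 | h0
    · omega
    · rw [h2] at h0; cases h0
  · have hlt : s' < s := by omega
    have h2 := maxRun_ins h' (s - 1) (by omega) (by omega)
    rcases maxRun_left h with h0 | h0
    · omega
    · rw [h2] at h0; cases h0

lemma maxRun_of_end {q t : List Char} {e : Nat} (hin : e < q.length)
    (hins : pvInsB q t e = true) (hni : pvInsB q t (e + 1) = false) :
    pvMaxRunB q t (e + 1 - pvRunLen q t e) e = true := by
  have hL1 := runLen_pos hins
  have hL2 := runLen_le q t e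
  rw [maxRunB_iff]
  refine ⟨by omega, hin, ?_, ?_, hni⟩
  · intro k hk1 hk2
    exact runLen_window q t e k hk1 hk2
  · exact runLen_boundary q t e

lemma bad_iff_maxrun (q t : List Char) (m : Int) : pvBad q t m = true ↔
    ∃ s e : Nat, pvMaxRunB q t s e = true ∧ (e : Int) - (s : Int) + 1 ≥ m ∧
      ∃ j : Nat, j ≤ e + 1 ∧ pvBbB q t j = true := by
  simp only [pvBad, List.any_eq_true, List.mem_range, Bool.and_eq_true, Bool.not_eq_true',
    decide_eq_true_eq]
  constructor
  · rintro ⟨e, he, ⟨⟨hins, hni⟩, hm⟩, j, hj, hbb⟩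
    have hL1 := runLen_pos hins
    have hL2 := runLen_le q t e
    refine ⟨e + 1 - pvRunLen q t e, e, maxRun_of_end he hins hni, by omega, j, by omega, hbb⟩
  · rintro ⟨s, e, hmr, hm, j, hj, hbb⟩
    have hb := maxRun_bounds hmr
    have hins := maxRun_ins hmr e hb.1 le_rfl
    have hni := maxRun_right hmr
    have hL1 := runLen_pos hins
    have hL2 := runLen_le q t e
    have hs : s = e + 1 - pvRunLen q t e :=
      maxRun_start_uniq hmr (maxRun_of_end hb.2 hins hni)
    refine ⟨e, hb.2, ⟨⟨hins, hni⟩, by omega⟩, j, by omega, hbb⟩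

lemma bad_iff (q t : List Char) (m : Int) : pvBad q t m = true ↔ ¬ pvP q t m 0 0 := by
  rw [bad_iff_maxrun]
  constructor
  · rintro ⟨s, e, hmr, hm, j, hj, hbb⟩ hp
    obtain ⟨-, hall⟩ := hp s e (by omega) hmr hm
    rw [hall j (by omega) (by omega)] at hbb
    cases hbb
  · intro hp
    rw [pvP] at hp
    push Not at hp
    obtain ⟨s, e, hs, hmr, hm, hne⟩ := hp
    obtain ⟨j, -, hj2, hbb⟩ := hne rfl
    exact ⟨s, e, hmr, hm, j, hj2, by simpa using hbb⟩

lemma ab_iff (qrow trow : String) (m : Int) (hpre : qrow.toList.length = trow.toList.length) :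
    find_query_insertions qrow trow m = find_query_insertions_alt qrow trow m ↔
      pvP qrow.toList trow.toList m 0 0 := by
  have hA : find_query_insertions qrow trow m = portA_go m qrow.toList trow.toList 0 0 := by
    unfold find_query_insertions
    rw [if_neg (by simp [hpre])]
  have hB : find_query_insertions_alt qrow trow m =
      rowsB m (specE (qrow.toList.zip trow.toList) 0 0 none) := by
    unfold find_query_insertions_alt
    rw [if_neg (by simp [hpre])]
    rw [runsB_spec, List.filterMap_map]
    rfl
  have hmain := mainA m qrow.toList.length qrow.toList trow.toList le_rfl hpre 0 0 0
  norm_num at hmain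
  have hgc := (gcgo qrow.toList trow.toList m hpre qrow.toList.length).1 0 0 0
    (by omega) le_rfl (Or.inl rfl)
  simp only [List.drop_zero, Nat.cast_zero] at hgc
  rw [hA, hB, hmain, rowsAB m _ 0 le_rfl]
  exact hgc

-- ===== VERDICT (by name: the statement is the Claim_ definition above) =====
theorem find_query_insertions_spec : Claim_unchanged_find_query_insertions := by
  intro qrow trow m _ hpre hnd
  exact (ab_iff qrow trow m hpre).2 (by
    by_contra h
    exact hnd ((bad_iff qrow.toList trow.toList m).2 h))

theorem find_query_insertions_changed : Claim_changed_find_query_insertions := by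
  unfold Claim_changed_find_query_insertions
  refine ⟨by decide, by decide, by decide, ?_, by decide, by decide⟩
  show find_query_insertions "AB" "-C" 1 = _
  have h1 : "AB".toList = ['A', 'B'] := by decide
  have h2 : "-C".toList = ['-', 'C'] := by decide
  unfold find_query_insertions
  rw [h1, h2]
  norm_num
  simp [portA_go, portA_inner, pvRowMk, pvDiffWitnessOut_find_query_insertions]

theorem find_query_insertions_tight : Claim_exact_find_query_insertions := by
  intro qrow trow m _ hpre hd
  exact fun h => (bad_iff qrow.toList trow.toList m).1 hd ((ab_iff qrow trow m hpre).1 h)
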